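-- pv_equiv track=rewrite | github.com/neo-schobert/MP3 | Cours/IPT/TD/Code/TD 1.py | dico_valide
-- ===== SOURCE A (Python) =====
-- def h(ch):
--     x=256
--     s=ord(ch[0])
--     n=len(ch)
--     for k in range(1,n):
--         s=s*x + ord(ch[k])
--     return s%255
--
-- def dico_valide(dict):
--     L=[]
--     condition=True
--     for k in dict:
--         if h(k) in L:
--             condition=False
--         L.append(h(k))
--     return condition
-- ===== SOURCE B (Python) =====
-- def h(ch):
--     x=256
--     s=ord(ch[0])
--     n=len(ch)
--     for k in range(1,n):
--         s=s*x + ord(ch[k])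
--     return s%255
--
-- def dico_valide(dict):
--     hashes = [h(k) for k in dict]
--     return len(set(hashes)) == len(hashes)
-- ===== Notes on version B (the rewrite author's own statement) =====
-- stated objective: simpler
-- what changed: Replaces A's running membership list (linear scan per key) with building the full hash list once and deciding distinctness by a single cardinality comparison len(set(hashes)) == len(hashes).
import Mathlib
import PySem

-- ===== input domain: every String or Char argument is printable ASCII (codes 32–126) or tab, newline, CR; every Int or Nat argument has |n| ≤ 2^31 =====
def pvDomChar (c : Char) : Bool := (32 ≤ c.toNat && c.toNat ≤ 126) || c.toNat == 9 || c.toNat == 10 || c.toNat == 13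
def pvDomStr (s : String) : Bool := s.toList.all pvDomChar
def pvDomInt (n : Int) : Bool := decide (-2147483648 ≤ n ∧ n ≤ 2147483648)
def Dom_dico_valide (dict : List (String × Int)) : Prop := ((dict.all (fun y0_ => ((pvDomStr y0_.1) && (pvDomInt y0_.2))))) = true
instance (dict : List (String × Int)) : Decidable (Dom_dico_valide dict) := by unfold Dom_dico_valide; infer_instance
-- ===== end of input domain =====

-- B replaces A's running list + per-key membership branch by aggregating all hashes first
-- and comparing cardinalities once (simpler; return-value equivalence, no mutation involved).

-- ===== PORT A =====
-- shared helper h (Source A and Source B contain the identical function h); the first character's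
-- ord: Python raises IndexError on an empty key, excluded by Pre_; total form uses 0 there.
def pyH (ch : String) : Int :=
  let cs := ch.toList
  let s0 : Int := match cs with | [] => 0 | c :: _ => (c.toNat : Int)
  let s := (PySem.List.pyRange 1 (cs.length : Int) 1).foldl
    (fun s k => s * 256 + ((PySem.List.pyGetD cs k 'A').toNat : Int)) s0
  PySem.Int.mod s 255

def dico_valide (dict : List (String × Int)) : Bool :=
  let st := dict.foldl
    (fun (acc : List Int × Bool) kv =>
      (acc.1 ++ [pyH kv.1], if acc.1.contains (pyH kv.1) then false else acc.2))
    ([], true)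
  st.2

-- ===== PORT B =====
def dico_valide_alt (dict : List (String × Int)) : Bool :=
  let hashes := dict.map (fun kv => pyH kv.1)
  (PySem.Set.ofList hashes).length == hashes.length

-- ===== PRECONDITION & SPEC =====
-- Pre_ excludes dictionaries with an empty-string key, on which h (hence both A and B) raises IndexError.
def Pre_dico_valide (dict : List (String × Int)) : Prop := ∀ kv ∈ dict, kv.1 ≠ ""
instance (dict : List (String × Int)) : Decidable (Pre_dico_valide dict) := by unfold Pre_dico_valide; infer_instance
def pvWitness_dico_valide : (List (String × Int)) := [("ab", 1), ("cd", 2)]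

def Spec_dico_valide (dict : List (String × Int)) (out : Bool) : Prop := out = dico_valide_alt dict
instance (dict : List (String × Int)) (out : Bool) : Decidable (Spec_dico_valide dict out) := by unfold Spec_dico_valide; infer_instance

-- ===== CLAIM (what is proved, stated in full; the proofs are below) =====
def Claim_equal_dico_valide : Prop := ∀ (dict : List (String × Int)), Dom_dico_valide dict → Pre_dico_valide dict → Spec_dico_valide dict (dico_valide dict)

-- ===== LEMMAS AND PROOFS =====

-- A's loop, folded over the list of hash values, computes c && Nodup-relative-to-L.
theorem loopA_eq (hs : List Int) (L : List Int) (c : Bool) :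
    (hs.foldl (fun (acc : List Int × Bool) hv =>
        (acc.1 ++ [hv], if acc.1.contains hv then false else acc.2)) (L, c)).2
      = (c && decide (hs.Nodup ∧ ∀ x ∈ hs, x ∉ L)) := by
  induction hs generalizing L c with
  | nil => simp
  | cons x xs ih =>
    simp only [List.foldl_cons, ih, List.nodup_cons]
    by_cases hx : x ∈ L
    · simp [hx]
    · simp only [List.contains_eq_mem, hx, decide_false, Bool.false_eq_true, if_false]
      congr 1
      rw [decide_eq_decide]
      constructor
      · rintro ⟨hnd, hall⟩
        have hxxs : x ∉ xs := fun hin =>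
          hall x hin (List.mem_append_right _ (List.mem_singleton_self x))
        refine ⟨⟨hxxs, hnd⟩, ?_⟩
        intro y hy
        rcases List.mem_cons.mp hy with rfl | hy'
        · exact hx
        · exact fun hL => hall y hy' (List.mem_append_left _ hL)
      · rintro ⟨⟨hxs, hnd⟩, hall⟩
        refine ⟨hnd, fun y hy => ?_⟩
        simp only [List.mem_append, List.mem_singleton]
        rintro (hL | rfl)
        · exact hall y (List.mem_cons_of_mem _ hy) hL
        · exact hxs hy

theorem length_ofList_eq_card (hs : List Int) :
    (PySem.Set.ofList hs).length = hs.toFinset.card := by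
  rw [← List.toFinset_card_of_nodup (PySem.Set.nodup_ofList hs)]
  congr 1
  ext x
  simp [PySem.Set.mem_ofList]

theorem card_len_eq_nodup (hs : List Int) :
    (((PySem.Set.ofList hs).length == hs.length) : Bool) = decide hs.Nodup := by
  by_cases hn : hs.Nodup
  · simp [PySem.Set.ofList_eq_self_of_nodup hs hn, hn]
  · have h1 : (PySem.Set.ofList hs).length = hs.dedup.length := by
      rw [length_ofList_eq_card, List.card_toFinset]
    have hne : (PySem.Set.ofList hs).length ≠ hs.length := by
      rw [h1]
      intro heq
      have := (hs.dedup_sublist).eq_of_length heq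
      exact hn (this ▸ hs.nodup_dedup)
    simp [hn, hne]

-- ===== VERDICT (by name: the statement is the Claim_ definition above) =====
theorem dico_valide_spec : Claim_equal_dico_valide := by
  intro dict _ _
  unfold Spec_dico_valide
  show (List.foldl (fun (acc : List Int × Bool) kv =>
      (acc.1 ++ [pyH kv.1], if acc.1.contains (pyH kv.1) then false else acc.2)) ([], true) dict).2
    = (((PySem.Set.ofList (dict.map (fun kv => pyH kv.1))).length
        == (dict.map (fun kv => pyH kv.1)).length) : Bool)
  rw [← List.foldl_map (f := fun kv : String × Int => pyH kv.1)
      (g := fun (acc : List Int × Bool) hv =>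
        (acc.1 ++ [hv], if acc.1.contains hv then false else acc.2))]
  rw [loopA_eq, card_len_eq_nodup]
  simp
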